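-- pv_equiv track=rewrite | github.com/NolanCSE/PokTTPRG | RandomPokemonGenerator/PDFReader/PokedexCSVFormatter.py | cleanEvol
-- ===== SOURCE A (Python) =====
-- def eliminateNewlines(name : str):
--     while "\n" in name:
--         if name.index("\n") != len(name) - 1 and name.index("\n") != 0:
--             name = name[:name.index("\n")] + " " + name[name.index("\n") + 1:]
--         elif name.index("\n") == 0:
--             name = name[1:]
--         else:
--             name = name[:name.index("\n")]
--     return name
--
-- def cleanEvol(evol : list):
--     evolBlock = ""
--     for index, evolution in enumerate(evol):
--         evolution = eliminateNewlines(evolution)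
--         i = 1
--         while str(i) + " - " in evolution:
--             begin = evolution.index(str(i) + " - ") + len(str(i) + " - ")
--             end = len(evolution)
--             if str(i + 1) + " - " in evolution:
--                 end = evolution.index(str(i + 1) + " - ")
--             evolBlock = evolBlock + str(i) + ": " + evolution[begin:end] + "\n"
--             i += 1
--         evol[index] = evolBlock
--         evolBlock = ""
--     return evol
-- ===== SOURCE B (Python) =====
-- def _clean(name: str) -> str:
--     t = name.lstrip("\n")
--     if t.endswith("\n"):
--         t = t[:-1]
--     return t.replace("\n", " ")
--
-- def cleanEvol(evol : list):
--     for k, s in enumerate(evol):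
--         s = _clean(s)
--         # one left-to-right pass: first occurrence of every "<digits> - " marker,
--         # keyed by the digit string (setdefault keeps the first, i.e. leftmost, one)
--         first = {}
--         for b in range(len(s)):
--             e = b
--             while e < len(s) and s[e].isdigit():
--                 e += 1
--             if e > b and s[e:e + 3] == " - ":
--                 first.setdefault(s[b:e], (b, e + 3))
--         pieces = []
--         i = 1
--         while str(i) in first:
--             begin = first[str(i)][1]
--             nxt = first.get(str(i + 1))
--             end = nxt[0] if nxt is not None else len(s)
--             pieces.append(f"{i}: {s[begin:end]}\n")
--             i += 1
--         evol[k] = "".join(pieces)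
--     return evol
-- ===== Notes on version B (the rewrite author's own statement) =====
-- stated objective: alternative
-- what changed: eliminateNewlines's one-newline-at-a-time rebuild loop is replaced by lstrip/endswith/replace, and the repeated evolution.index(str(i) + ' - ') substring scans are replaced by one left-to-right pass that records the first occurrence of every '<digits> - ' marker in a dict keyed by the digit string, after which the chain loop is plain dict lookups; it trades repeated C-level index scans for a single explicit scan plus a lookup table.
import Mathlib
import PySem

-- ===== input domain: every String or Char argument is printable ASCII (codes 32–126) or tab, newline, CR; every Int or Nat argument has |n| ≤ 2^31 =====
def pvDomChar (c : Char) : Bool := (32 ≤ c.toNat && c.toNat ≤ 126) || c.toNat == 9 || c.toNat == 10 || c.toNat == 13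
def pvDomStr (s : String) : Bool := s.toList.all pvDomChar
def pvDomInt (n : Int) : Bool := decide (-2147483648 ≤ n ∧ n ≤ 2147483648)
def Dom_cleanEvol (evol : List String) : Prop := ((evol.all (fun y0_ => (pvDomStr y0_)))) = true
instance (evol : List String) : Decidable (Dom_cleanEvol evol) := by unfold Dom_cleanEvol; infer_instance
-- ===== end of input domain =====

-- B replaces A's repeated `evolution.index(str(i) + " - ")` scans by one left-to-right pass that
-- records the first occurrence of every "<digits> - " marker in a dict, then a short lookup loop.
-- A mutates `evol` in place and returns it; B performs the same in-place mutation; the theorem is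
-- about the (identical) return value.

-- helper facts cited by the ports' `decreasing_by` proofs
theorem pv_find_split (name sub : List Char) (h : PySem.Chars.isIn sub name = true) :
    name = name.take (PySem.Chars.find name sub).toNat ++ sub ++
      name.drop ((PySem.Chars.find name sub).toNat + sub.length) := by
  have hpre : sub <+: name.drop (PySem.Chars.find name sub).toNat :=
    (PySem.Chars.find_spec ((PySem.Chars.find_nonneg_iff name sub).2
      ((PySem.Chars.isIn_iff_infix sub name).1 h))).1
  obtain ⟨u, hu⟩ := hpre
  have hdrop : name.drop ((PySem.Chars.find name sub).toNat + sub.length) = u := by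
    have h2 : name.drop ((PySem.Chars.find name sub).toNat + sub.length) =
        (name.drop (PySem.Chars.find name sub).toNat).drop sub.length := by
      rw [List.drop_drop, Nat.add_comm]
    rw [h2, ← hu, List.drop_left]
  rw [hdrop, List.append_assoc, hu, List.take_append_drop]

theorem pv_toChars_nat (i : Nat) : PySem.Int.toChars (i : Int) = Nat.toDigits 10 i := by
  simp [PySem.Int.toChars]

theorem pv_lt_pow_of_toChars_le (i L : Nat) (h : (PySem.Int.toChars (i : Int)).length ≤ L) :
    i < 10 ^ L := by
  rw [pv_toChars_nat] at h
  calc i < 10 ^ (Nat.toDigits 10 i).length :=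
        (Nat.length_toDigits_le_iff (by norm_num) Nat.length_toDigits_pos).1 le_rfl
    _ ≤ 10 ^ L := Nat.pow_le_pow_right (by norm_num) h

theorem pv_get?_mem_keys {l : List (List Char × (Nat × Nat))} {k : List Char} {v : Nat × Nat}
    (h : (PySem.Dict.mk l).get? k = some v) : k ∈ l.map Prod.fst := by
  induction l with
  | nil => simp [PySem.Dict.get?] at h
  | cons p rest ih =>
    rw [show p = (p.1, p.2) from rfl, PySem.Dict.get?_mk_cons] at h
    by_cases hk : (p.1 == k) = true
    · exact List.mem_map.2 ⟨p, List.mem_cons_self, eq_of_beq hk⟩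
    · simp only [hk, if_neg, Bool.false_eq_true, not_false_iff] at h
      exact List.mem_cons.2 (Or.inr (ih (by simpa [hk] using h)))

theorem pv_le_foldr_max {x : Nat} {xs : List Nat} (h : x ∈ xs) : x ≤ xs.foldr max 0 := by
  induction xs with
  | nil => simp at h
  | cons y ys ih =>
    rcases List.mem_cons.1 h with rfl | hm
    · exact le_max_left _ _
    · exact le_trans (ih hm) (le_max_right _ _)

-- ===== PORT A =====
-- A-side helper: eliminateNewlines.  Python slices name[:idx], name[idx+1:], name[1:] are
-- List.take / List.drop here (the indices are nonnegative and in range, so they are exact).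
def elimNLA (name : List Char) : List Char :=
  if h : PySem.Chars.isIn ['\n'] name then
    if (PySem.Chars.find name ['\n']).toNat ≠ name.length - 1 ∧
        (PySem.Chars.find name ['\n']).toNat ≠ 0 then
      elimNLA (name.take (PySem.Chars.find name ['\n']).toNat ++ [' '] ++
        name.drop ((PySem.Chars.find name ['\n']).toNat + 1))
    else if (PySem.Chars.find name ['\n']).toNat = 0 then
      elimNLA (name.drop 1)
    else
      elimNLA (name.take (PySem.Chars.find name ['\n']).toNat)
  else name
termination_by name.count '\n'
decreasing_by
  · have hs := pv_find_split name ['\n'] h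
    conv_rhs => rw [hs]
    simp [List.count_append, List.count_cons]
  · rename_i hne hz
    have hs := pv_find_split name ['\n'] h
    rw [hz] at hs
    simp only [List.take_zero, List.nil_append, Nat.zero_add, List.singleton_append] at hs
    conv_rhs => rw [hs]
    simp [List.count_cons]
  · have hs := pv_find_split name ['\n'] h
    conv_rhs => rw [hs]
    simp [List.count_append, List.count_cons]

-- A-side helper: the inner `while str(i) + " - " in evolution` loop (evolBlock accumulator).
-- `evolution[begin:end]` = (take end).drop begin (both indices nonnegative, Python-clamped = take/drop).
def blockA (evolution : List Char) (evolBlock : List Char) (i : Nat) : List Char :=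
  if h : PySem.Chars.isIn (PySem.Int.toChars (i : Int) ++ [' ', '-', ' ']) evolution then
    let begin_ : Nat := (PySem.Chars.find evolution (PySem.Int.toChars (i : Int) ++ [' ', '-', ' '])).toNat
        + (PySem.Int.toChars (i : Int) ++ [' ', '-', ' ']).length
    let end_ : Nat :=
      if PySem.Chars.isIn (PySem.Int.toChars ((i : Int) + 1) ++ [' ', '-', ' ']) evolution then
        (PySem.Chars.find evolution (PySem.Int.toChars ((i : Int) + 1) ++ [' ', '-', ' '])).toNat
      else evolution.length
    blockA evolution
      (evolBlock ++ PySem.Int.toChars (i : Int) ++ [':', ' '] ++ (evolution.take end_).drop begin_ ++ ['\n'])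
      (i + 1)
  else evolBlock
termination_by 10 ^ evolution.length + 1 - i
decreasing_by
  have hlt : i < 10 ^ evolution.length := by
    apply pv_lt_pow_of_toChars_le
    have := ((PySem.Chars.isIn_iff_infix _ evolution).1 h).length_le
    simp only [List.length_append, List.length_cons, List.length_nil] at this
    omega
  omega

def cleanEvol (evol : List String) : List String :=
  evol.map (fun evolution => String.ofList (blockA (elimNLA evolution.toList) [] 1))

-- ===== PORT B =====
-- B-side helper: _clean.  lstrip("\n") = dropWhile (· == '\n') (exact: strips exactly leading '\n');
-- t[:-1] = dropLast.
def cleanB (name : List Char) : List Char :=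
  let t := name.dropWhile (· == '\n')
  let t := if PySem.Chars.endswith t ['\n'] then t.dropLast else t
  PySem.Chars.replace t ['\n'] [' ']

-- B-side helper: the inner `while e < len(s) and s[e].isdigit()` walk (short-circuit `and`).
def runEnd (s : List Char) (e : Nat) : Nat :=
  if h : e < s.length then
    if PySem.Chars.isdigit s[e] then runEnd s (e + 1) else e
  else e
termination_by s.length - e

-- B-side helper: the `for b in range(len(s))` pass building `first` (setdefault = insert-if-absent);
-- s[e:e+3] = (take (e+3)).drop e and s[b:e] = (take e).drop b (nonnegative, Python-clamped = take/drop).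
def buildFirst (s : List Char) : PySem.Dict (List Char) (Nat × Nat) :=
  (List.range s.length).foldl
    (fun d b =>
      let e := runEnd s b
      if b < e ∧ (s.take (e + 3)).drop e = [' ', '-', ' '] then
        if d.contains ((s.take e).drop b) then d
        else d.insert ((s.take e).drop b) (b, e + 3)
      else d)
    PySem.Dict.empty

-- termination helper for piecesB: 10 ^ (longest key length) bounds every label present in the dict
def maxKeyLen (d : PySem.Dict (List Char) (Nat × Nat)) : Nat :=
  (d.keys.map List.length).foldr max 0

-- B-side helper: the `while str(i) in first` lookup loop, collecting `pieces`.
def piecesB (s : List Char) (first : PySem.Dict (List Char) (Nat × Nat)) (pieces : List (List Char))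
    (i : Nat) : List (List Char) :=
  match h : first.get? (PySem.Int.toChars (i : Int)) with
  | some bp =>
      let begin_ : Nat := bp.2
      let end_ : Nat :=
        match first.get? (PySem.Int.toChars ((i : Int) + 1)) with
        | some q => q.1
        | none => s.length
      piecesB s first
        (pieces ++ [PySem.Int.toChars (i : Int) ++ [':', ' '] ++ (s.take end_).drop begin_ ++ ['\n']])
        (i + 1)
  | none => pieces
termination_by 10 ^ maxKeyLen first + 1 - i
decreasing_by
  have hmem : PySem.Int.toChars (i : Int) ∈ first.items.map Prod.fst := pv_get?_mem_keys h
  have hlen : (PySem.Int.toChars (i : Int)).length ≤ maxKeyLen first :=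
    pv_le_foldr_max (List.mem_map.2 ⟨_, hmem, rfl⟩)
  have := pv_lt_pow_of_toChars_le _ _ hlen
  omega

def cleanEvol_alt (evol : List String) : List String :=
  evol.map (fun s0 =>
    let s := cleanB s0.toList
    let first := buildFirst s
    String.ofList (PySem.Chars.join [] (piecesB s first [] 1)))

-- ===== PRECONDITION & SPEC =====
def Spec_cleanEvol (evol : List String) (out : List String) : Prop := out = cleanEvol_alt evol
instance (evol : List String) (out : List String) : Decidable (Spec_cleanEvol evol out) := by unfold Spec_cleanEvol; infer_instance

-- ===== CLAIM (what is proved, stated in full; the proofs are below) =====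
def Claim_equal_cleanEvol : Prop := ∀ (evol : List String), Dom_cleanEvol evol → Spec_cleanEvol evol (cleanEvol evol)

-- ===== LEMMAS AND PROOFS =====

-- `replace t "\n" " "` is the pointwise newline→space substitution
def pvSub (c : Char) : Char := if c == '\n' then ' ' else c

theorem pv_replace_go (fuel : Nat) (l acc : List Char) (hf : l.length ≤ fuel) :
    PySem.Chars.replace.go ['\n'] [' '] fuel l acc = acc.reverse ++ l.map pvSub := by
  induction fuel generalizing l acc with
  | zero =>
    cases l with
    | nil => simp [PySem.Chars.replace.go, pvSub]
    | cons c t => simp at hf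
  | succ n ih =>
    cases l with
    | nil => simp [PySem.Chars.replace.go]
    | cons c t =>
      by_cases hc : c = '\n'
      · subst hc
        simp only [PySem.Chars.replace.go, List.isPrefixOf, BEq.rfl, Bool.and_self,
          List.isPrefixOf_nil_left, if_true, List.length_cons, List.length_nil,
          List.drop_succ_cons, List.drop_zero, List.reverse_cons, List.reverse_nil,
          List.nil_append, List.singleton_append]
        rw [ih t (' ' :: acc) (by simp at hf; omega)]
        simp [pvSub]
      · simp only [PySem.Chars.replace.go, List.isPrefixOf, List.isPrefixOf_nil_left]
        have hbe : (('\n' == c) = false) := by simpa using fun hx => hc hx.symm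
        simp only [hbe, Bool.false_and, Bool.false_eq_true, if_false]
        rw [ih t (c :: acc) (by simp at hf; omega)]
        simp [pvSub, hc]

theorem pv_replace_eq_map (t : List Char) :
    PySem.Chars.replace t ['\n'] [' '] = t.map pvSub := by
  rw [PySem.Chars.replace]
  simp only [List.isEmpty_cons, Bool.false_eq_true, if_false]
  simpa using pv_replace_go t.length t [] le_rfl

theorem pv_endswith_nl (s : List Char) :
    PySem.Chars.endswith s ['\n'] = true ↔ s.getLast? = some '\n' := by
  rw [PySem.Chars.endswith, List.isSuffixOf_iff_suffix]
  constructor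
  · rintro ⟨u, rfl⟩; simp
  · intro h
    obtain ⟨l', rfl⟩ := List.getLast?_eq_some_iff.1 h
    exact ⟨l', rfl⟩

theorem pv_cleanB_eq (name : List Char) :
    cleanB name =
      ((if (name.dropWhile (· == '\n')).getLast? = some '\n' then
          (name.dropWhile (· == '\n')).dropLast
        else name.dropWhile (· == '\n')).map pvSub) := by
  rw [cleanB]
  by_cases h : (name.dropWhile (· == '\n')).getLast? = some '\n'
  · rw [if_pos ((pv_endswith_nl _).2 h), if_pos h, pv_replace_eq_map]
  · rw [if_neg (fun hb => h ((pv_endswith_nl _).1 hb)), if_neg h, pv_replace_eq_map]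


theorem pv_map_pvSub_id {a : List Char} (h : '\n' ∉ a) : a.map pvSub = a := by
  have hp : ∀ x ∈ a, pvSub x = x := fun x hx => by
    unfold pvSub
    rw [if_neg (by simp; rintro rfl; exact h hx)]
  rw [List.map_congr_left hp]
  exact List.map_id _

theorem pv_dropWhile_no_nl {a : List Char} (r : List Char) (ha : a ≠ []) (h : '\n' ∉ a) :
    (a ++ r).dropWhile (· == '\n') = a ++ r := by
  cases a with
  | nil => exact absurd rfl ha
  | cons c a' =>
    rw [List.cons_append, List.dropWhile_cons_of_neg]
    simp only [List.mem_cons, not_or] at h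
    simpa using fun hc => h.1 hc.symm

theorem pv_cleanB_cons_nl (t : List Char) : cleanB ('\n' :: t) = cleanB t := by
  rw [pv_cleanB_eq, pv_cleanB_eq, List.dropWhile_cons_of_pos (by simp)]

theorem pv_cleanB_nonl {name : List Char} (h : '\n' ∉ name) : cleanB name = name := by
  rw [pv_cleanB_eq]
  have hd : name.dropWhile (· == '\n') = name := by
    cases name with
    | nil => rfl
    | cons c t =>
      rw [List.dropWhile_cons_of_neg]
      simp only [List.mem_cons, not_or] at h
      simpa using fun hc => h.1 hc.symm
  rw [hd, if_neg (fun hl => h (List.mem_of_getLast? hl)), pv_map_pvSub_id h]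

theorem pv_cleanB_last {a : List Char} (ha : a ≠ []) (h : '\n' ∉ a) :
    cleanB (a ++ ['\n']) = cleanB a := by
  rw [pv_cleanB_eq, pv_cleanB_eq, pv_dropWhile_no_nl ['\n'] ha h]
  have hd : a.dropWhile (· == '\n') = a := by
    cases a with
    | nil => rfl
    | cons c t =>
      rw [List.dropWhile_cons_of_neg]
      simp only [List.mem_cons, not_or] at h
      simpa using fun hc => h.1 hc.symm
  rw [hd, if_pos (by simp), if_neg (fun hl => h (List.mem_of_getLast? hl)),
    List.dropLast_concat, pv_map_pvSub_id h]

theorem pv_cleanB_swap {a t : List Char} (ha : a ≠ []) (h : '\n' ∉ a) (ht : t ≠ []) :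
    cleanB (a ++ [' '] ++ t) = cleanB (a ++ '\n' :: t) := by
  rw [pv_cleanB_eq, pv_cleanB_eq, List.append_assoc, List.singleton_append,
    pv_dropWhile_no_nl (' ' :: t) ha h, pv_dropWhile_no_nl ('\n' :: t) ha h]
  have hl : ∀ x : Char, (a ++ x :: t).getLast? = t.getLast? := fun x => by
    rw [List.append_cons, List.getLast?_append_of_ne_nil _ ht]
  have hdl : ∀ x : Char, (a ++ x :: t).dropLast = a ++ x :: t.dropLast := fun x => by
    rw [List.dropLast_append_of_ne_nil (by simp), List.dropLast_cons_of_ne_nil ht]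
  rw [hl, hl]
  by_cases hg : t.getLast? = some '\n'
  · rw [if_pos hg, if_pos hg, hdl, hdl]
    simp [pvSub]
  · rw [if_neg hg, if_neg hg]
    simp [pvSub]

theorem pv_nl_split (name : List Char) (h : PySem.Chars.isIn ['\n'] name = true) :
    name = name.take (PySem.Chars.find name ['\n']).toNat ++ '\n' ::
        name.drop ((PySem.Chars.find name ['\n']).toNat + 1) ∧
      '\n' ∉ name.take (PySem.Chars.find name ['\n']).toNat ∧
      (PySem.Chars.find name ['\n']).toNat < name.length := by
  have hnn : 0 ≤ PySem.Chars.find name ['\n'] :=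
    (PySem.Chars.find_nonneg_iff name ['\n']).2 ((PySem.Chars.isIn_iff_infix _ name).1 h)
  obtain ⟨hpre, hmin⟩ := PySem.Chars.find_spec hnn
  have hlt : (PySem.Chars.find name ['\n']).toNat < name.length := by
    by_contra hge
    rw [List.drop_eq_nil_of_le (by omega)] at hpre
    simpa using List.prefix_nil.1 hpre
  refine ⟨?_, ?_, hlt⟩
  · have hs := pv_find_split name ['\n'] h
    simpa using hs
  · intro hmem
    obtain ⟨j, hj, hje⟩ := List.getElem_of_mem hmem
    have hjlt : j < (PySem.Chars.find name ['\n']).toNat := by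
      have := List.length_take_le (PySem.Chars.find name ['\n']).toNat name
      omega
    have hj' : name[j]'(by omega) = '\n' := by
      rw [← hje]; simp [List.getElem_take]
    refine hmin j hjlt ⟨name.drop (j + 1), ?_⟩
    rw [List.singleton_append, ← hj', ← List.drop_eq_getElem_cons (by omega)]

theorem pv_elim_eq_clean (name : List Char) : elimNLA name = cleanB name := by
  fun_induction elimNLA name with
  | case1 name h hcond ih =>
    rw [ih]
    obtain ⟨hs, hnm, hlt⟩ := pv_nl_split name h
    conv_rhs => rw [hs]
    refine pv_cleanB_swap ?_ hnm ?_
    · intro hnil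
      have hlen := congrArg List.length hnil
      rw [List.length_take] at hlen
      simp only [List.length_nil] at hlen
      rcases hcond with ⟨h1, h2⟩
      omega
    · intro hnil
      have hlen := congrArg List.length hnil
      rw [List.length_drop] at hlen
      simp only [List.length_nil] at hlen
      rcases hcond with ⟨h1, h2⟩
      omega
  | case2 name h hcond hz ih =>
    rw [ih]
    obtain ⟨hs, hnm, hlt⟩ := pv_nl_split name h
    rw [hz] at hs
    simp only [List.take_zero, List.nil_append, Nat.zero_add] at hs
    conv_rhs => rw [hs]
    rw [pv_cleanB_cons_nl]
  | case3 name h hcond hz ih =>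
    rw [ih]
    obtain ⟨hs, hnm, hlt⟩ := pv_nl_split name h
    have hdr : name.drop ((PySem.Chars.find name ['\n']).toNat + 1) = [] := by
      apply List.drop_eq_nil_of_le
      rcases not_and_or.1 hcond with h1 | h2
      · rw [not_not] at h1; omega
      · exact absurd (not_not.1 h2) hz
    rw [hdr] at hs
    conv_rhs => rw [hs]
    exact (pv_cleanB_last (by
      intro hnil
      have hlen := congrArg List.length hnil
      rw [List.length_take] at hlen
      simp only [List.length_nil] at hlen
      omega) hnm).symm
  | case4 name h =>
    rw [pv_cleanB_nonl]
    intro hmem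
    obtain ⟨l1, l2, rfl⟩ := List.append_of_mem hmem
    exact h ((PySem.Chars.isIn_iff_infix _ _).2 ⟨l1, l2, by simp⟩)


-- ---- the dict built by B: characterization ----
def pvSep : List Char := [' ', '-', ' ']

def pvStep (s : List Char) (d : PySem.Dict (List Char) (Nat × Nat)) (b : Nat) :
    PySem.Dict (List Char) (Nat × Nat) :=
  let e := runEnd s b
  if b < e ∧ (s.take (e + 3)).drop e = [' ', '-', ' '] then
    if d.contains ((s.take e).drop b) then d
    else d.insert ((s.take e).drop b) (b, e + 3)
  else d

theorem pv_buildFirst_eq (s : List Char) :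
    buildFirst s = (List.range s.length).foldl (pvStep s) PySem.Dict.empty := rfl

theorem pv_runEnd_eq (s : List Char) (e : Nat) :
    runEnd s e = e + ((s.drop e).takeWhile PySem.Chars.isdigit).length := by
  fun_induction runEnd s e with
  | case1 e h hd ih =>
    rw [ih, List.drop_eq_getElem_cons h, List.takeWhile_cons_of_pos hd]
    simp
    try omega
  | case2 e h hd =>
    rw [List.drop_eq_getElem_cons h, List.takeWhile_cons_of_neg hd]
    simp
  | case3 e h =>
    rw [List.drop_eq_nil_of_le (by omega)]
    simp

theorem pv_runEnd_le (s : List Char) (b : Nat) (hb : b ≤ s.length) : runEnd s b ≤ s.length := by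
  rw [pv_runEnd_eq]
  have h1 : ((s.drop b).takeWhile PySem.Chars.isdigit).length ≤ (s.drop b).length :=
    (List.takeWhile_sublist _).length_le
  rw [List.length_drop] at h1
  omega

-- a condition fire at b is exactly an occurrence of "<key> - " at b
theorem pv_cond_fire (s : List Char) (b : Nat) (hb : b < s.length)
    (hbe : b < runEnd s b) (hsep : (s.take (runEnd s b + 3)).drop (runEnd s b) = pvSep) :
    ((s.take (runEnd s b)).drop b ++ pvSep).isPrefixOf (s.drop b) = true ∧
      runEnd s b + 3 ≤ s.length ∧
      ((s.take (runEnd s b)).drop b).length = runEnd s b - b := by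
  have hle : runEnd s b ≤ s.length := pv_runEnd_le s b (by omega)
  have h3 : runEnd s b + 3 ≤ s.length := by
    have := congrArg List.length hsep
    simp only [List.length_drop, List.length_take, pvSep, List.length_cons,
      List.length_nil] at this
    omega
  have hklen : ((s.take (runEnd s b)).drop b).length = runEnd s b - b := by
    simp only [List.length_drop, List.length_take]
    omega
  refine ⟨?_, h3, hklen⟩
  rw [List.isPrefixOf_iff_prefix]
  have hsplit1 : s.drop b = (s.take (runEnd s b)).drop b ++ s.drop (runEnd s b) := by
    rw [List.drop_take]
    have : s.drop (runEnd s b) = ((s.drop b).drop (runEnd s b - b)) := by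
      rw [List.drop_drop]
      try (congr 1; omega)
    rw [this, List.take_append_drop]
  have hsplit2 : s.drop (runEnd s b) = pvSep ++ s.drop (runEnd s b + 3) := by
    rw [← hsep, List.drop_take]
    have : s.drop (runEnd s b + 3) = ((s.drop (runEnd s b)).drop 3) := by
      rw [List.drop_drop]
      try (congr 1; omega)
    rw [this]
    have h33 : runEnd s b + 3 - runEnd s b = 3 := by omega
    rw [h33, List.take_append_drop]
  exact ⟨s.drop (runEnd s b + 3), by rw [List.append_assoc, ← hsplit2, ← hsplit1]⟩

-- an occurrence of "<d> - " at b (d nonempty, all digits) fires the condition with key d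
theorem pv_occ_cond (s d : List Char) (b : Nat) (hd : d ≠ [])
    (hdig : ∀ c ∈ d, PySem.Chars.isdigit c = true)
    (hocc : (d ++ pvSep).isPrefixOf (s.drop b) = true) :
    runEnd s b = b + d.length ∧
      (s.take (b + d.length + 3)).drop (b + d.length) = [' ', '-', ' '] ∧
      (s.take (b + d.length)).drop b = d ∧
      b + d.length + 3 ≤ s.length ∧ b < s.length := by
  rw [List.isPrefixOf_iff_prefix] at hocc
  obtain ⟨r, hr⟩ := hocc
  rw [List.append_assoc] at hr
  have hlen := congrArg List.length hr
  simp only [List.length_append, List.length_drop, pvSep, List.length_cons,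
    List.length_nil] at hlen
  have hblen : b ≤ s.length := by omega
  have hre : runEnd s b = b + d.length := by
    rw [pv_runEnd_eq, ← hr, List.takeWhile_append_of_pos hdig]
    simp only [pvSep, List.cons_append]
    rw [List.takeWhile_cons_of_neg (by decide)]
    simp
  have hdropb : (s.drop b).take d.length = d := by
    rw [← hr]
    have := List.take_left (l₁ := d) (l₂ := pvSep ++ r)
    simpa using this
  refine ⟨hre, ?_, ?_, by omega, by omega⟩
  · rw [List.drop_take]
    have h33 : b + d.length + 3 - (b + d.length) = 3 := by omega
    rw [h33]
    have hd2 : s.drop (b + d.length) = (s.drop b).drop d.length := by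
      rw [List.drop_drop]
      try (congr 1; omega)

    rw [hd2, ← hr, List.drop_left]
    have := List.take_left (l₁ := (pvSep : List Char)) (l₂ := r)
    simpa [pvSep] using this
  · rw [List.drop_take]
    have hdd : b + d.length - b = d.length := by omega
    rw [hdd, hdropb]

def pvFirst (s d : List Char) (m : Nat) : Option (Nat × Nat) :=
  ((List.range m).find? (fun b => (d ++ pvSep).isPrefixOf (s.drop b))).map
    (fun b => (b, b + d.length + 3))

theorem pv_fold_spec (s : List Char) (d : List Char) (hd : d ≠ [])
    (hdig : ∀ c ∈ d, PySem.Chars.isdigit c = true) :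
    ∀ m, m ≤ s.length →
      ((List.range m).foldl (pvStep s) PySem.Dict.empty).get? d = pvFirst s d m := by
  intro m
  induction m with
  | zero => intro _; simp [pvFirst, PySem.Dict.empty, PySem.Dict.get?]
  | succ m ih =>
    intro hm
    rw [List.range_succ, List.foldl_append, List.foldl_cons, List.foldl_nil]
    have ihm := ih (by omega)
    rw [pvFirst, List.range_succ, List.find?_append]
    cases hfo : (List.range m).find? (fun b => (d ++ pvSep).isPrefixOf (s.drop b)) with
    | some b0 =>
      have hsome : ((List.range m).foldl (pvStep s) PySem.Dict.empty).get? d =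
          some (b0, b0 + d.length + 3) := by rw [ihm, pvFirst, hfo]; rfl
      rw [Option.or_of_isSome (by simp [hfo])]
      show (pvStep s _ m).get? d = _
      rw [pvStep]
      split
      · split
        · rw [hsome]; rfl
        · rename_i hcond hcont
          by_cases hkd : (s.take (runEnd s m)).drop m = d
          · rw [PySem.Dict.contains_eq_isSome_get?, hkd, hsome] at hcont
            simp at hcont
          · rw [PySem.Dict.get?_insert_of_ne _ _ (fun hh => hkd hh.symm), hsome]; rfl
      · rw [hsome]; rfl
    | none =>
      have hnone : ((List.range m).foldl (pvStep s) PySem.Dict.empty).get? d = none := by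
        rw [ihm, pvFirst, hfo]; rfl
      rw [Option.none_or]
      show (pvStep s _ m).get? d = _
      by_cases hp : (d ++ pvSep).isPrefixOf (s.drop m) = true
      · -- occurrence at m: the condition fires with key d and inserts (m, m+|d|+3)
        obtain ⟨hre, hsep, hkey, h3, hmlt⟩ := pv_occ_cond s d m hd hdig hp
        rw [pvStep]
        rw [if_pos (by
          rw [hre]
          exact ⟨by have := List.length_pos_of_ne_nil hd; omega, hsep⟩)]
        rw [PySem.Dict.contains_eq_isSome_get?]
        have hkeyd : (s.take (runEnd s m)).drop m = d := by rw [hre]; exact hkey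
        rw [hkeyd, hnone]
        simp only [Option.isSome_none, Bool.false_eq_true, if_false]
        rw [PySem.Dict.get?_insert_self]
        simp [List.find?, hp, hre]
      · -- no occurrence at m: the dict entry for d does not change
        have hrhs : List.find? (fun b => (d ++ pvSep).isPrefixOf (s.drop b)) [m] = none := by
          simp [List.find?, hp]
        rw [hrhs]
        simp only [Option.map_none]
        rw [pvStep]
        split
        · rename_i hcond
          obtain ⟨hbe, hsep⟩ := hcond
          obtain ⟨hpk, _, _⟩ := pv_cond_fire s m (by omega) hbe (by rw [pvSep]; exact hsep)
          split
          · exact hnone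
          · have hkd : (s.take (runEnd s m)).drop m ≠ d := fun hh => hp (by rwa [hh] at hpk)
            rw [PySem.Dict.get?_insert_of_ne _ _ (fun hh => hkd hh.symm), hnone]
        · exact hnone

theorem pv_find?_range {p : Nat → Bool} {n j : Nat} (hj : j < n) (hpj : p j = true)
    (hmin : ∀ k < j, ¬ p k = true) : (List.range n).find? p = some j := by
  induction n with
  | zero => omega
  | succ n ih =>
    rw [List.range_succ, List.find?_append]
    rcases Nat.lt_or_ge j n with hlt | hge
    · rw [ih hlt, Option.some_or]
    · have hjn : j = n := by omega
      subst hjn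
      rw [List.find?_eq_none.2 (fun k hk => hmin k (List.mem_range.1 hk)), Option.none_or,
        List.find?_cons_of_pos hpj]

theorem pv_first_find (s d : List Char) (hd : d ≠ []) :
    pvFirst s d s.length =
      if PySem.Chars.isIn (d ++ pvSep) s = true then
        some ((PySem.Chars.find s (d ++ pvSep)).toNat,
          (PySem.Chars.find s (d ++ pvSep)).toNat + d.length + 3)
      else none := by
  split
  · rename_i h
    have hnn : 0 ≤ PySem.Chars.find s (d ++ pvSep) :=
      (PySem.Chars.find_nonneg_iff s (d ++ pvSep)).2 ((PySem.Chars.isIn_iff_infix _ s).1 h)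
    obtain ⟨hpre, hmin⟩ := PySem.Chars.find_spec hnn
    have hlt : (PySem.Chars.find s (d ++ pvSep)).toNat < s.length := by
      by_contra hge
      rw [List.drop_eq_nil_of_le (by omega)] at hpre
      have := List.prefix_nil.1 hpre
      simp [hd] at this
    rw [pvFirst, pv_find?_range hlt (List.isPrefixOf_iff_prefix.2 hpre)
      (fun k hk hgk => hmin k hk (List.isPrefixOf_iff_prefix.1 hgk))]
    rfl
  · rename_i h
    rw [pvFirst, List.find?_eq_none.2 (fun b _ hgb => ?_)]
    · rfl
    · refine h ((PySem.Chars.isIn_iff_infix _ s).2 ?_)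
      obtain ⟨r, hr⟩ := List.isPrefixOf_iff_prefix.1 hgb
      exact ⟨s.take b, r, by rw [List.append_assoc, hr, List.take_append_drop]⟩

theorem pv_buildFirst_spec (s d : List Char) (hd : d ≠ [])
    (hdig : ∀ c ∈ d, PySem.Chars.isdigit c = true) :
    (buildFirst s).get? d =
      if PySem.Chars.isIn (d ++ pvSep) s = true then
        some ((PySem.Chars.find s (d ++ pvSep)).toNat,
          (PySem.Chars.find s (d ++ pvSep)).toNat + d.length + 3)
      else none := by
  rw [pv_buildFirst_eq, pv_fold_spec s d hd hdig s.length le_rfl, pv_first_find s d hd]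


-- ---- the two inner loops compute the same block ----
theorem pv_join_flatten (ps : List (List Char)) : PySem.Chars.join [] ps = ps.flatten := by
  rw [PySem.Chars.join]
  induction ps with
  | nil => simp [List.intercalate]
  | cons a t ih => cases t <;> simp_all [List.intercalate, List.intersperse]

theorem pv_toChars_ne_nil (i : Nat) : PySem.Int.toChars (i : Int) ≠ [] := by
  rw [pv_toChars_nat]
  exact List.ne_nil_of_length_pos Nat.length_toDigits_pos

theorem pv_toChars_digit (i : Nat) : ∀ c ∈ PySem.Int.toChars (i : Int), PySem.Chars.isdigit c = true := by
  rw [pv_toChars_nat]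
  intro c hc
  have h := Nat.isDigit_of_mem_toDigits (b := 10) (by norm_num) (by norm_num) hc
  revert h
  simp [Char.isDigit, PySem.Chars.isdigit, Char.le_def]
  try omega

theorem pv_cast_succ (i : Nat) : (i : Int) + 1 = ((i + 1 : Nat) : Int) := by push_cast; ring

-- step equations for blockA
theorem pv_blockA_pos (s acc : List Char) (i : Nat)
    (h : PySem.Chars.isIn (PySem.Int.toChars (i : Int) ++ [' ', '-', ' ']) s = true) :
    blockA s acc i = blockA s
      (acc ++ PySem.Int.toChars (i : Int) ++ [':', ' '] ++
        (s.take (if PySem.Chars.isIn (PySem.Int.toChars ((i : Int) + 1) ++ [' ', '-', ' ']) s = true then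
            (PySem.Chars.find s (PySem.Int.toChars ((i : Int) + 1) ++ [' ', '-', ' '])).toNat
          else s.length)).drop
          ((PySem.Chars.find s (PySem.Int.toChars (i : Int) ++ [' ', '-', ' '])).toNat +
            (PySem.Int.toChars (i : Int) ++ [' ', '-', ' ']).length) ++ ['\n'])
      (i + 1) := by
  conv_lhs => rw [blockA]
  rw [dif_pos h]

theorem pv_blockA_neg (s acc : List Char) (i : Nat)
    (h : ¬ PySem.Chars.isIn (PySem.Int.toChars (i : Int) ++ [' ', '-', ' ']) s = true) :
    blockA s acc i = acc := by
  conv_lhs => rw [blockA]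
  rw [dif_neg h]

-- step equations for piecesB
theorem pv_piecesB_some (s : List Char) (first : PySem.Dict (List Char) (Nat × Nat))
    (pieces : List (List Char)) (i : Nat) (bp : Nat × Nat)
    (h : first.get? (PySem.Int.toChars (i : Int)) = some bp) :
    piecesB s first pieces i = piecesB s first
      (pieces ++ [PySem.Int.toChars (i : Int) ++ [':', ' '] ++
        (s.take (match first.get? (PySem.Int.toChars ((i : Int) + 1)) with
          | some q => q.1
          | none => s.length)).drop bp.2 ++ ['\n']])
      (i + 1) := by
  conv_lhs => rw [piecesB]
  split
  · rename_i bp' heq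
    rw [heq] at h
    cases h
    try rfl
  · rename_i heq
    rw [heq] at h
    cases h

theorem pv_piecesB_none (s : List Char) (first : PySem.Dict (List Char) (Nat × Nat))
    (pieces : List (List Char)) (i : Nat)
    (h : first.get? (PySem.Int.toChars (i : Int)) = none) :
    piecesB s first pieces i = pieces := by
  conv_lhs => rw [piecesB]
  split
  · rename_i bp' heq
    rw [heq] at h
    cases h
  · rfl

-- accumulator lemmas
theorem pv_blockA_acc (s : List Char) :
    ∀ (n i : Nat) (acc : List Char), 10 ^ s.length + 1 - i ≤ n →
      blockA s acc i = acc ++ blockA s [] i := by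
  intro n
  induction n with
  | zero =>
    intro i acc hn
    by_cases h : PySem.Chars.isIn (PySem.Int.toChars (i : Int) ++ [' ', '-', ' ']) s = true
    · exfalso
      have hlt : i < 10 ^ s.length := by
        apply pv_lt_pow_of_toChars_le
        have := ((PySem.Chars.isIn_iff_infix _ s).1 h).length_le
        simp only [List.length_append, List.length_cons, List.length_nil] at this
        omega
      omega
    · rw [pv_blockA_neg s acc i h, pv_blockA_neg s [] i h, List.append_nil]
  | succ n ih =>
    intro i acc hn
    by_cases h : PySem.Chars.isIn (PySem.Int.toChars (i : Int) ++ [' ', '-', ' ']) s = true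
    · have hlt : i < 10 ^ s.length := by
        apply pv_lt_pow_of_toChars_le
        have := ((PySem.Chars.isIn_iff_infix _ s).1 h).length_le
        simp only [List.length_append, List.length_cons, List.length_nil] at this
        omega
      rw [pv_blockA_pos s acc i h, pv_blockA_pos s [] i h]
      rw [ih (i + 1) _ (by omega)]
      conv_rhs => rw [ih (i + 1) _ (by omega)]
      simp [List.append_assoc]
    · rw [pv_blockA_neg s acc i h, pv_blockA_neg s [] i h, List.append_nil]

theorem pv_piecesB_acc (s : List Char) (first : PySem.Dict (List Char) (Nat × Nat)) :
    ∀ (n i : Nat) (pieces : List (List Char)), 10 ^ maxKeyLen first + 1 - i ≤ n →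
      piecesB s first pieces i = pieces ++ piecesB s first [] i := by
  intro n
  induction n with
  | zero =>
    intro i pieces hn
    cases h : first.get? (PySem.Int.toChars (i : Int)) with
    | some bp =>
      exfalso
      have hmem : PySem.Int.toChars (i : Int) ∈ first.items.map Prod.fst := pv_get?_mem_keys h
      have hlen : (PySem.Int.toChars (i : Int)).length ≤ maxKeyLen first :=
        pv_le_foldr_max (List.mem_map.2 ⟨_, hmem, rfl⟩)
      have := pv_lt_pow_of_toChars_le _ _ hlen
      omega
    | none => rw [pv_piecesB_none s first pieces i h, pv_piecesB_none s first [] i h, List.append_nil]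
  | succ n ih =>
    intro i pieces hn
    cases h : first.get? (PySem.Int.toChars (i : Int)) with
    | some bp =>
      have hmem : PySem.Int.toChars (i : Int) ∈ first.items.map Prod.fst := pv_get?_mem_keys h
      have hlen : (PySem.Int.toChars (i : Int)).length ≤ maxKeyLen first :=
        pv_le_foldr_max (List.mem_map.2 ⟨_, hmem, rfl⟩)
      have hlt := pv_lt_pow_of_toChars_le _ _ hlen
      rw [pv_piecesB_some s first pieces i bp h, pv_piecesB_some s first [] i bp h]
      rw [ih (i + 1) _ (by omega)]
      conv_rhs => rw [ih (i + 1) _ (by omega)]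
      simp [List.append_assoc]
    | none => rw [pv_piecesB_none s first pieces i h, pv_piecesB_none s first [] i h, List.append_nil]

-- the two loops agree
theorem pv_loop (s : List Char) :
    ∀ (n i : Nat), 10 ^ s.length + 1 - i ≤ n →
      blockA s [] i = (piecesB s (buildFirst s) [] i).flatten := by
  intro n
  induction n with
  | zero =>
    intro i hn
    by_cases h : PySem.Chars.isIn (PySem.Int.toChars (i : Int) ++ [' ', '-', ' ']) s = true
    · exfalso
      have hlt : i < 10 ^ s.length := by
        apply pv_lt_pow_of_toChars_le
        have := ((PySem.Chars.isIn_iff_infix _ s).1 h).length_le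
        simp only [List.length_append, List.length_cons, List.length_nil] at this
        omega
      omega
    · have hget : (buildFirst s).get? (PySem.Int.toChars (i : Int)) = none := by
        rw [pv_buildFirst_spec s _ (pv_toChars_ne_nil i) (pv_toChars_digit i)]
        rw [if_neg]
        exact h
      rw [pv_blockA_neg s [] i h, pv_piecesB_none s _ [] i hget]
      rfl
  | succ n ih =>
    intro i hn
    by_cases h : PySem.Chars.isIn (PySem.Int.toChars (i : Int) ++ [' ', '-', ' ']) s = true
    · have hlt : i < 10 ^ s.length := by
        apply pv_lt_pow_of_toChars_le
        have := ((PySem.Chars.isIn_iff_infix _ s).1 h).length_le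
        simp only [List.length_append, List.length_cons, List.length_nil] at this
        omega
      have hget : (buildFirst s).get? (PySem.Int.toChars (i : Int)) =
          some ((PySem.Chars.find s (PySem.Int.toChars (i : Int) ++ pvSep)).toNat,
            (PySem.Chars.find s (PySem.Int.toChars (i : Int) ++ pvSep)).toNat +
              (PySem.Int.toChars (i : Int)).length + 3) := by
        rw [pv_buildFirst_spec s _ (pv_toChars_ne_nil i) (pv_toChars_digit i), if_pos]
        exact h
      have hend : (match (buildFirst s).get? (PySem.Int.toChars ((i : Int) + 1)) with
          | some q => q.1
          | none => s.length) =
          (if PySem.Chars.isIn (PySem.Int.toChars ((i : Int) + 1) ++ [' ', '-', ' ']) s = true then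
            (PySem.Chars.find s (PySem.Int.toChars ((i : Int) + 1) ++ [' ', '-', ' '])).toNat
          else s.length) := by
        rw [pv_cast_succ]
        rw [pv_buildFirst_spec s _ (pv_toChars_ne_nil (i + 1)) (pv_toChars_digit (i + 1))]
        by_cases h2 : PySem.Chars.isIn (PySem.Int.toChars ((i + 1 : Nat) : Int) ++ pvSep) s = true
        · rw [if_pos h2, if_pos (by rw [pvSep] at h2; exact h2)]
          try rfl
        · rw [if_neg h2, if_neg (by rw [pvSep] at h2; exact h2)]
          try rfl
      rw [pv_blockA_pos s [] i h, pv_piecesB_some s _ [] i _ hget,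
        pv_blockA_acc s (n + 1) (i + 1) _ (by omega),
        pv_piecesB_acc s _ (10 ^ maxKeyLen (buildFirst s) + 1) (i + 1) _ (Nat.sub_le _ _),
        ih (i + 1) (by omega)]
      rw [List.flatten_append]
      congr 1
      simp only [List.flatten_cons, List.flatten_nil, List.append_nil, List.nil_append]
      rw [hend]
      simp only [pvSep, List.length_append, List.length_cons, List.length_nil]
      have harith : ∀ a b : Nat, a + (b + (0 + 1 + 1 + 1)) = a + b + 3 := by intros; omega
      rw [harith]
    · have hget : (buildFirst s).get? (PySem.Int.toChars (i : Int)) = none := by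
        rw [pv_buildFirst_spec s _ (pv_toChars_ne_nil i) (pv_toChars_digit i), if_neg]
        exact h
      rw [pv_blockA_neg s [] i h, pv_piecesB_none s _ [] i hget]
      rfl

theorem pv_core_equal (cs : List Char) :
    blockA (elimNLA cs) [] 1 = PySem.Chars.join [] (piecesB (cleanB cs) (buildFirst (cleanB cs)) [] 1) := by
  rw [pv_elim_eq_clean, pv_join_flatten]
  exact pv_loop (cleanB cs) (10 ^ (cleanB cs).length + 1) 1 (Nat.sub_le _ _)

-- ===== VERDICT (by name: the statement is the Claim_ definition above) =====
theorem cleanEvol_spec : Claim_equal_cleanEvol := by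
  intro evol _
  show _ = _
  unfold cleanEvol cleanEvol_alt
  exact List.map_congr_left (fun s _ => by rw [pv_core_equal])
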